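-- pv_equiv track=rewrite | github.com/Xwoe/matchmaking | matchmaking.py | get_idx_combos
-- ===== SOURCE A (Python) =====
-- def get_idx_combos(idxs_0, idxs_1):
--     """
--     Get all combinations of two sets of indices when swapping only one
--     member between the two sets.
--     """
--     combos = []
--     for idx_0 in idxs_0:
--         for idx_1 in idxs_1:
--             _idxs_0 = idxs_0.copy()
--             _idxs_1 = idxs_1.copy()
--             _idxs_0.remove(idx_0)
--             _idxs_0.append(idx_1)
--             _idxs_1.remove(idx_1)
--             _idxs_1.append(idx_0)
--             combos.append((_idxs_0, _idxs_1))
--     return combos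
-- ===== SOURCE B (Python) =====
-- def get_idx_combos(idxs_0, idxs_1):
--     """
--     Get all combinations of two sets of indices when swapping only one
--     member between the two sets.
--     """
--     def first_removed(xs):
--         # value -> xs with the first occurrence of that value removed,
--         # built in one positional scan (no remove() calls at all)
--         d = {}
--         for i, v in enumerate(xs):
--             if v not in d:
--                 d[v] = xs[:i] + xs[i + 1:]
--         return d
--     b0 = first_removed(idxs_0)
--     b1 = first_removed(idxs_1)
--     return [(b0[v0] + [v1], b1[v1] + [v0])
--             for v0 in idxs_0 for v1 in idxs_1]
-- ===== Notes on version B (the rewrite author's own statement) =====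
-- stated objective: alternative
-- what changed: B replaces A's per-pair copy()+remove() with a hash index built once per input list (value -> list with its first occurrence removed, computed by one positional enumerate scan using slices), then emits all pairs by pure dict lookups and concatenation in the same nested order.
import Mathlib
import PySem

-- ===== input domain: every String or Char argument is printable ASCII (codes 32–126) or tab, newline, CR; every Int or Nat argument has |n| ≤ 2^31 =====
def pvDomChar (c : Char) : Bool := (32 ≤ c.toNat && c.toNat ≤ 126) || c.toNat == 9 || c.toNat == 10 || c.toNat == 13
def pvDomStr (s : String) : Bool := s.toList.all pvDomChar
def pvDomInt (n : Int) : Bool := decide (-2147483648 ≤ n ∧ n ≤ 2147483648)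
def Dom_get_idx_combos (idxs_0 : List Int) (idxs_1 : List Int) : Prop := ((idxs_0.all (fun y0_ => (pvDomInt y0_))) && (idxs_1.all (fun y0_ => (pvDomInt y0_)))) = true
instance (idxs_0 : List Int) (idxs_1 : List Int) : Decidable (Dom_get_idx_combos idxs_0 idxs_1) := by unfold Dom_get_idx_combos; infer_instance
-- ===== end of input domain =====

-- B builds a dict (value -> list with first occurrence of that value removed) once per input list in one enumerate pass, then produces the pairs by lookups and concatenation in A's order (alternative decomposition).


-- ===== PORT A =====
def get_idx_combos (idxs_0 : List Int) (idxs_1 : List Int) : List (List Int × List Int) :=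
  idxs_0.foldl (fun combos idx_0 =>
    idxs_1.foldl (fun combos idx_1 =>
      combos ++ [(((PySem.List.remove? idxs_0 idx_0).getD idxs_0) ++ [idx_1],
                  ((PySem.List.remove? idxs_1 idx_1).getD idxs_1) ++ [idx_0])]) combos) []

-- ===== PORT B =====
-- first_removed(xs): the enumerate loop 'if v not in d: d[v] = xs[:i] + xs[i+1:]'
def pvFirstRemoved (xs : List Int) : PySem.Dict Int (List Int) :=
  (PySem.List.enumerate xs).foldl
    (fun d p =>
      if d.contains p.2 then d
      else d.insert p.2 (PySem.List.slice xs none (some p.1) ++ PySem.List.slice xs (some (p.1 + 1)) none))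
    PySem.Dict.empty

def get_idx_combos_alt (idxs_0 : List Int) (idxs_1 : List Int) : List (List Int × List Int) :=
  let b0 := pvFirstRemoved idxs_0
  let b1 := pvFirstRemoved idxs_1
  -- b0[v0] / b1[v1]: the key is always present (v0 ∈ idxs_0, v1 ∈ idxs_1), so d[k] never raises; total form
  idxs_0.flatMap (fun v0 => idxs_1.map (fun v1 =>
    ((b0.get? v0).getD [] ++ [v1], (b1.get? v1).getD [] ++ [v0])))

-- ===== PRECONDITION & SPEC =====
def Spec_get_idx_combos (idxs_0 : List Int) (idxs_1 : List Int) (out : List (List Int × List Int)) : Prop := out = get_idx_combos_alt idxs_0 idxs_1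
instance (idxs_0 : List Int) (idxs_1 : List Int) (out : List (List Int × List Int)) : Decidable (Spec_get_idx_combos idxs_0 idxs_1 out) := by unfold Spec_get_idx_combos; infer_instance

-- ===== CLAIM (what is proved, stated in full; the proofs are below) =====
def Claim_equal_get_idx_combos : Prop := ∀ (idxs_0 : List Int) (idxs_1 : List Int), Dom_get_idx_combos idxs_0 idxs_1 → Spec_get_idx_combos idxs_0 idxs_1 (get_idx_combos idxs_0 idxs_1)

-- ===== LEMMAS AND PROOFS =====

lemma pvFirstRemoved_aux (ys : List Int) (xs : List Int) :
    ∀ (pre : List Int) (d : PySem.Dict Int (List Int)),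
    ys = pre ++ xs →
    (∀ k, d.contains k = decide (k ∈ pre)) →
    (∀ k ∈ pre, d.get? k = some (ys.erase k)) →
    ∀ v ∈ pre ++ xs,
      ((PySem.List.enumerate xs (pre.length : Int)).foldl
        (fun d p =>
          if d.contains p.2 then d
          else d.insert p.2 (PySem.List.slice ys none (some p.1) ++ PySem.List.slice ys (some (p.1 + 1)) none))
        d).get? v = some (ys.erase v) := by
  induction xs with
  | nil =>
    intro pre d _ _ hget v hv
    simp [PySem.List.enumerate] at *
    exact hget v hv
  | cons x rest ih =>
    intro pre d hys hcont hget v hv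
    rw [PySem.List.enumerate_cons, List.foldl_cons]
    have htake : PySem.List.slice ys none (some (pre.length : Int)) = pre := by
      rw [PySem.List.slice_to_natCast, hys, List.take_left]
    have hdrop : PySem.List.slice ys (some ((pre.length : Int) + 1)) none = rest := by
      have : ((pre.length : Int) + 1) = ((pre.length + 1 : Nat) : Int) := by push_cast; ring
      rw [this, PySem.List.slice_from_natCast, hys]
      have : pre ++ x :: rest = (pre ++ [x]) ++ rest := by simp
      rw [this, List.drop_left' (by simp)]
    have hmem' : v ∈ (pre ++ [x]) ++ rest := by simpa using hv
    have hlen : ((pre ++ [x]).length : Int) = (pre.length : Int) + 1 := by push_cast [List.length_append]; norm_num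
    by_cases hx : x ∈ pre
    · -- x already in d: step leaves d unchanged
      have : d.contains x = true := by rw [hcont]; simp [hx]
      simp only [this, if_true]
      rw [← hlen]
      exact ih (pre ++ [x]) d (by simpa using hys)
        (fun k => by rw [hcont]; simp [List.mem_append]; by_cases hk : k = x <;> simp [hk, hx])
        (fun k hk => by
          rcases (by simpa using hk : k ∈ pre ∨ k = x) with h | h
          · exact hget k h
          · subst h; exact hget k hx)
        v hmem'
    · -- fresh key: insert x ↦ pre ++ rest = ys.erase x
      have hc : d.contains x = false := by rw [hcont]; simp [hx]
      have herase : ys.erase x = pre ++ rest := by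
        rw [hys, List.erase_append_right _ hx, List.erase_cons_head]
      simp only [hc, Bool.false_eq_true, if_false, htake, hdrop]
      rw [← hlen]
      refine ih (pre ++ [x]) _ (by simpa using hys)
        (fun k => ?_) (fun k hk => ?_) v hmem'
      · rw [PySem.Dict.contains_insert, hcont]
        by_cases hk : k = x <;> simp [hk, List.mem_append]
      · rcases (by simpa using hk : k ∈ pre ∨ k = x) with h | h
        · rw [PySem.Dict.get?_insert, if_neg (by rintro rfl; exact hx h)]
          exact hget k h
        · subst h
          rw [PySem.Dict.get?_insert_self, herase]

lemma pvFirstRemoved_get? (xs : List Int) (v : Int) (hv : v ∈ xs) :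
    (pvFirstRemoved xs).get? v = some (xs.erase v) := by
  unfold pvFirstRemoved
  have := pvFirstRemoved_aux xs xs [] PySem.Dict.empty (by simp)
    (fun k => by simp [PySem.Dict.contains_empty]) (fun k hk => by simp at hk) v (by simpa using hv)
  simpa using this

-- ===== VERDICT (by name: the statement is the Claim_ definition above) =====
theorem get_idx_combos_spec : Claim_equal_get_idx_combos := by
  intro idxs_0 idxs_1 _
  unfold Spec_get_idx_combos get_idx_combos get_idx_combos_alt
  simp only [PySem.List.foldl_append_singleton_eq_map, PySem.List.foldl_append_eq_flatMap,
    List.nil_append]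
  simp only [List.flatMap]
  congr 1
  apply List.map_congr_left
  intro v0 h0
  apply List.map_congr_left
  intro v1 h1
  rw [pvFirstRemoved_get? idxs_0 v0 h0, pvFirstRemoved_get? idxs_1 v1 h1]
  simp [PySem.List.remove?_eq_some_erase _ _ h0, PySem.List.remove?_eq_some_erase _ _ h1]
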